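-- pv_equiv track=rewrite | github.com/paiml/depyler | examples/hard_combo_pigeonhole.py | has_duplicate_mod
-- ===== SOURCE A (Python) =====
-- def has_duplicate_mod(vals: list[int], m: int) -> int:
--     """Check if any two values have same remainder mod m (pigeonhole if len > m)."""
--     n: int = len(vals)
--     if n > m:
--         return 1
--     seen: list[int] = []
--     i: int = 0
--     while i < m:
--         seen.append(0)
--         i = i + 1
--     j: int = 0
--     while j < n:
--         r: int = vals[j] % m
--         if seen[r] == 1:
--             return 1
--         seen[r] = 1
--         j = j + 1
--     return 0
-- ===== SOURCE B (Python) =====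
-- def has_duplicate_mod(vals: list[int], m: int) -> int:
--     """Check if any two values have same remainder mod m (pigeonhole if len > m)."""
--     if len(vals) > m:
--         return 1
--     rs = sorted(v % m for v in vals)
--     for a, b in zip(rs, rs[1:]):
--         if a == b:
--             return 1
--     return 0
-- ===== Notes on version B (the rewrite author's own statement) =====
-- stated objective: simpler
-- what changed: Replaces A's seen-table of m flags (built by one loop, indexed by a second) with sort-the-remainders-then-scan-adjacent-pairs; the pigeonhole early return is kept, which also preserves behaviour for m <= 0.
import Mathlib
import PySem

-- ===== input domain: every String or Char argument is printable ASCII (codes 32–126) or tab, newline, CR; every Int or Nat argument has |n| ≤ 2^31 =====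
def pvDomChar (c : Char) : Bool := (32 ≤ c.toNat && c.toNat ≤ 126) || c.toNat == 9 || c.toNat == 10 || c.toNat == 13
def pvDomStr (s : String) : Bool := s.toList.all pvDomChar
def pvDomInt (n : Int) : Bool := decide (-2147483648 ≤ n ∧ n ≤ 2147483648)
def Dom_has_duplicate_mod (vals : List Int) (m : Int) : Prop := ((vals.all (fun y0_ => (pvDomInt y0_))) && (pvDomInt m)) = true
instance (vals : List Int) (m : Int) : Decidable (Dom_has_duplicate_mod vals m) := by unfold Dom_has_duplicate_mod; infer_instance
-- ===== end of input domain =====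

-- B replaces A's seen-table of m flags with sort-remainders-then-scan-adjacent-pairs (simpler; same pigeonhole early return).


-- ===== PORT A =====
-- while i < m: seen.append(0); i = i + 1
-- (every entry of seen is 0 throughout this loop, so appending 0 at the front, which keeps the
--  recursion tail-call and O(m), yields literally the same list value as Python's seen.append(0))
def pvSeenLoop (seen : List Int) (i m : Int) : List Int :=
  if i < m then pvSeenLoop (0 :: seen) (i + 1) m else seen
termination_by (m - i).toNat
decreasing_by omega

-- while j < n: r = vals[j] % m; if seen[r] == 1: return 1; seen[r] = 1; j = j + 1
-- (vals[j] and seen[r] use the total pyGetD/pySetD forms; both indices are in range on every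
--  execution A reaches: 0 ≤ j < n, and when the loop runs 1 ≤ n ≤ m so 0 ≤ r < m = len(seen))
def pvScanA (vals : List Int) (m : Int) (seen : List Int) (j : Int) : Int :=
  if j < (vals.length : Int) then
    let r : Int := PySem.Int.mod (PySem.List.pyGetD vals j 0) m
    if PySem.List.pyGetD seen r 0 = 1 then 1
    else pvScanA vals m (PySem.List.pySetD seen r 1) (j + 1)
  else 0
termination_by ((vals.length : Int) - j).toNat
decreasing_by omega

def has_duplicate_mod (vals : List Int) (m : Int) : Int :=
  let n : Int := (vals.length : Int)
  if n > m then 1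
  else pvScanA vals m (pvSeenLoop [] 0 m) 0

-- ===== PORT B =====
-- for a, b in zip(rs, rs[1:]): if a == b: return 1   (scan over adjacent pairs)
def pvAdjScan : List Int → Int
  | a :: b :: t => if a = b then 1 else pvAdjScan (b :: t)
  | _ => 0

def has_duplicate_mod_alt (vals : List Int) (m : Int) : Int :=
  if (vals.length : Int) > m then 1
  else pvAdjScan (PySem.List.sorted (vals.map (fun v => PySem.Int.mod v m)) (fun x => x) false)

-- ===== PRECONDITION & SPEC =====
def Spec_has_duplicate_mod (vals : List Int) (m : Int) (out : Int) : Prop := out = has_duplicate_mod_alt vals m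
instance (vals : List Int) (m : Int) (out : Int) : Decidable (Spec_has_duplicate_mod vals m out) := by unfold Spec_has_duplicate_mod; infer_instance

-- ===== CLAIM (what is proved, stated in full; the proofs are below) =====
def Claim_equal_has_duplicate_mod : Prop := ∀ (vals : List Int) (m : Int), Dom_has_duplicate_mod vals m → Spec_has_duplicate_mod vals m (has_duplicate_mod vals m)

-- ===== LEMMAS AND PROOFS =====

theorem length_pySetD (xs : List Int) (i v : Int) :
    (PySem.List.pySetD xs i v).length = xs.length := by
  simp [PySem.List.pySetD, PySem.List.pySet?, PySem.List.pyIdx?]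
  split <;> split <;> simp

theorem pvSeenLoop_eq (seen : List Int) (i m : Int) :
    pvSeenLoop seen i m = List.replicate (m - i).toNat 0 ++ seen := by
  generalize hk : (m - i).toNat = k
  induction k generalizing seen i with
  | zero =>
    rw [pvSeenLoop]
    rw [if_neg (by omega)]
    simp
  | succ k ih =>
    rw [pvSeenLoop, if_pos (by omega)]
    rw [ih (0 :: seen) (i + 1) (by omega)]
    simp [List.replicate_succ']

theorem pvScanA_eq (vals : List Int) (m : Int) (hm : 0 < m) :
    ∀ (k j : Nat) (seen : List Int), vals.length - j = k → j ≤ vals.length →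
    seen.length = m.toNat →
    (∀ r : Int, 0 ≤ r → r < m →
      (PySem.List.pyGetD seen r 0 = 1 ↔ r ∈ (vals.take j).map (fun v => PySem.Int.mod v m))) →
    pvScanA vals m seen (j : Int) =
      if ((vals.drop j).map (fun v => PySem.Int.mod v m)).Nodup ∧
         (∀ r ∈ (vals.drop j).map (fun v => PySem.Int.mod v m),
            r ∉ (vals.take j).map (fun v => PySem.Int.mod v m))
      then 0 else 1 := by
  intro k
  induction k with
  | zero =>
    intro j seen hk hj _ _
    have hjl : j = vals.length := by omega
    rw [pvScanA, if_neg (by exact_mod_cast by omega)]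
    subst hjl
    simp
  | succ k ih =>
    intro j seen hk hj hlen hinv
    have hjlt : j < vals.length := by omega
    rw [pvScanA, if_pos (by exact_mod_cast hjlt)]
    have hget : PySem.List.pyGetD vals (j : Int) 0 = vals[j] := by
      simp [PySem.List.pyGetD_natCast, List.getD_eq_getElem?_getD, List.getElem?_eq_getElem hjlt]
    set r : Int := PySem.Int.mod (PySem.List.pyGetD vals (j : Int) 0) m with hr
    have hfr : PySem.Int.mod vals[j] m = r := by rw [hr, hget]
    have hr0 : 0 ≤ r := PySem.Int.mod_nonneg _ hm
    have hrm : r < m := PySem.Int.mod_lt _ hm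
    have hdrop : vals.drop j = vals[j] :: vals.drop (j + 1) :=
      List.drop_eq_getElem_cons hjlt
    have htake : (vals.take (j + 1)).map (fun v => PySem.Int.mod v m)
        = (vals.take j).map (fun v => PySem.Int.mod v m) ++ [r] := by
      rw [List.take_add_one, List.getElem?_eq_getElem hjlt, List.map_append]
      simp only [Option.toList_some, List.map_cons, List.map_nil, hfr]
    have hrlen : r.toNat < seen.length := by omega
    by_cases hseen : PySem.List.pyGetD seen r 0 = 1
    · rw [if_pos hseen]
      have hmem : r ∈ (vals.take j).map (fun v => PySem.Int.mod v m) :=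
        (hinv r hr0 hrm).mp hseen
      rw [if_neg]
      rintro ⟨-, hall⟩
      exact hall r (by rw [hdrop, List.map_cons, hfr]; exact List.mem_cons_self) hmem
    · rw [if_neg hseen]
      have hnotmem : r ∉ (vals.take j).map (fun v => PySem.Int.mod v m) :=
        fun hmem => hseen ((hinv r hr0 hrm).mpr hmem)
      have hset : ∀ x : Int, 0 ≤ x →
          PySem.List.pyGetD (PySem.List.pySetD seen r 1) x 0
            = if x = r then 1 else PySem.List.pyGetD seen x 0 := by
        intro x hx
        have hx' : (x.toNat : Int) = x := by omega
        have hr' : (r.toNat : Int) = r := by omega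
        rw [← hx', ← hr',
          PySem.List.pyGetD_pySetD_natCast seen r.toNat x.toNat 1 0 hrlen]
        by_cases hxr : x.toNat = r.toNat
        · rw [if_pos hxr, if_pos (by omega)]
        · rw [if_neg hxr, if_neg (by omega)]
      have hrec := ih (j + 1) (PySem.List.pySetD seen r 1) (by omega) (by omega)
        (by rw [length_pySetD]; exact hlen)
        (by
          intro x hx0 hxm
          rw [hset x hx0, htake]
          by_cases hxr : x = r
          · simp [hxr]
          · simp only [List.mem_append, List.mem_singleton, hxr, or_false]
            exact hinv x hx0 hxm)
      have hcast : (j : Int) + 1 = ((j + 1 : Nat) : Int) := by push_cast; ring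
      rw [hcast, hrec]
      refine if_congr ?_ rfl rfl
      rw [hdrop, htake]
      simp only [List.map_cons, hfr, List.nodup_cons, List.mem_cons, List.mem_append]
      constructor
      · rintro ⟨hnd, hall⟩
        refine ⟨⟨fun hrin => (not_or.mp (hall r hrin)).2 (Or.inl rfl), hnd⟩, ?_⟩
        rintro x (rfl | hx)
        · exact hnotmem
        · exact (not_or.mp (hall x hx)).1
      · rintro ⟨⟨hrnot, hnd⟩, hall⟩
        refine ⟨hnd, ?_⟩
        intro x hx
        rintro (hxT | rfl | hxnil)
        · exact hall x (Or.inr hx) hxT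
        · exact hrnot hx
        · simp at hxnil

theorem pvAdjScan_eq (l : List Int) (h : l.Pairwise (· ≤ ·)) :
    pvAdjScan l = if l.Nodup then 0 else 1 := by
  induction l with
  | nil => simp [pvAdjScan]
  | cons a t ih =>
    cases t with
    | nil => simp [pvAdjScan]
    | cons b t2 =>
      by_cases hab : a = b
      · subst hab
        simp [pvAdjScan, List.nodup_cons]
      · have htail : (b :: t2).Pairwise (· ≤ ·) := h.of_cons
        have hrest := ih htail
        have hanot : a ∉ b :: t2 := by
          intro hmem
          rcases List.mem_cons.mp hmem with rfl | hmem2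
          · exact hab rfl
          · have hab' : a ≤ b := (List.pairwise_cons.mp h).1 b (by simp)
            have hbx : b ≤ a := (List.pairwise_cons.mp htail).1 a hmem2
            exact hab (le_antisymm hab' hbx)
        rw [show pvAdjScan (a :: b :: t2) = if a = b then 1 else pvAdjScan (b :: t2) from rfl,
          if_neg hab, hrest]
        refine if_congr ?_ rfl rfl
        simp [List.nodup_cons, hanot]

theorem has_duplicate_mod_eq_core (vals : List Int) (m : Int) :
    has_duplicate_mod vals m = has_duplicate_mod_alt vals m := by
  unfold has_duplicate_mod has_duplicate_mod_alt
  by_cases hnm : (vals.length : Int) > m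
  · simp [hnm]
  · rw [if_neg hnm, if_neg hnm]
    cases vals with
    | nil =>
      rw [pvScanA, if_neg (by simp)]
      have hsnil : PySem.List.sorted (List.map (fun v => PySem.Int.mod v m) []) (fun x => x) false = [] := by
        have := PySem.List.sorted_perm (List.map (fun v => PySem.Int.mod v m) ([] : List Int)) (fun x => x) false
        simpa using this.eq_nil
      rw [hsnil]
      rfl
    | cons v0 vt =>
      have hm : 0 < m := by
        have : (1 : Int) ≤ ((v0 :: vt).length : Int) := by simp
        omega
      set f : Int → Int := fun v => PySem.Int.mod v m with hf
      set xs : List Int := v0 :: vt with hxs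
      have hseen : pvSeenLoop [] 0 m = List.replicate m.toNat 0 := by
        rw [pvSeenLoop_eq]; simp
      have hA := pvScanA_eq xs m hm xs.length 0 (List.replicate m.toNat 0)
        (by omega) (by omega) (by simp)
        (by
          intro x hx0 hxm
          have hx : x.toNat < m.toNat := by omega
          have : PySem.List.pyGetD (List.replicate m.toNat (0 : Int)) x 0 = 0 := by
            have hx' : (x.toNat : Int) = x := by omega
            rw [← hx', PySem.List.pyGetD_natCast, List.getD_eq_getElem?_getD,
              List.getElem?_eq_getElem (by simpa using hx)]
            simp
          simp [this])
      rw [hseen]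
      rw [show ((0 : Nat) : Int) = (0 : Int) from rfl] at hA
      rw [hA]
      have hs := pvAdjScan_eq (PySem.List.sorted (xs.map f) (fun x => x) false)
        (PySem.List.sorted_pairwise (xs.map f) (fun x => x))
      rw [hs]
      refine if_congr ?_ rfl rfl
      have hperm := PySem.List.sorted_perm (xs.map f) (fun x => x) false
      rw [hperm.nodup_iff]
      simp [hf]

-- ===== VERDICT (by name: the statement is the Claim_ definition above) =====
theorem has_duplicate_mod_spec : Claim_equal_has_duplicate_mod := by
  intro vals m _
  unfold Spec_has_duplicate_mod
  exact has_duplicate_mod_eq_core vals m
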